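-- pv_equiv track=rewrite | github.com/milthorpe/chapel | tools/chpl-language-server/src/chpl-language-server.py | encode_deltas
-- ===== SOURCE A (Python) =====
-- from typing import (
--     Any,
--     Callable,
--     Dict,
--     Generic,
--     Iterable,
--     List,
--     Optional,
--     Set,
--     Tuple,
--     TypeVar,
--     Union,
-- )
--
-- def encode_deltas(
--     tokens: List[Tuple[int, int, int]], token_type: int, token_modifiers: int
-- ) -> List[int]:
--     """
--     Given a (non-encoded) list of token positions, applies the LSP delta-encoding
--     to it: each line is encoded as a delta from the previous line, and each
--     column is encoded as a delta from the previous column.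
--
--     Returns tokens with type token_type, and modifiers token_modifiers.
--     """
--
--     encoded = []
--     last_line = None
--     last_col = 0
--     for line, start, length in tokens:
--         backup = line
--         if line == last_line:
--             start -= last_col
--         if last_line is not None:
--             line -= last_line
--         last_line = backup
--
--         encoded.extend([line, start, length, token_type, token_modifiers])
--     return encoded
-- ===== SOURCE B (Python) =====
-- def encode_deltas(tokens, token_type, token_modifiers):
--     # Columnar construction: preallocate the flat 5n output and fill it
--     # column-by-column with strided slice assignments; line deltas come from
--     # a separate adjacent-difference pass over the line numbers.
--     n = len(tokens)
--     res = [0] * (5 * n)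
--     lines = [t[0] for t in tokens]
--     res[0::5] = lines[:1] + [b - a for a, b in zip(lines, lines[1:])]
--     res[1::5] = [t[1] for t in tokens]
--     res[2::5] = [t[2] for t in tokens]
--     res[3::5] = [token_type] * n
--     res[4::5] = [token_modifiers] * n
--     return res
-- ===== Notes on version B (the rewrite author's own statement) =====
-- stated objective: alternative
-- what changed: Transposes the computation: preallocates the flat 5n output and fills it column-by-column with strided slice assignments, computing the line deltas as a separate adjacent-difference pass, instead of A's row-wise loop with last_line/last_col/backup state.
import Mathlib
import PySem

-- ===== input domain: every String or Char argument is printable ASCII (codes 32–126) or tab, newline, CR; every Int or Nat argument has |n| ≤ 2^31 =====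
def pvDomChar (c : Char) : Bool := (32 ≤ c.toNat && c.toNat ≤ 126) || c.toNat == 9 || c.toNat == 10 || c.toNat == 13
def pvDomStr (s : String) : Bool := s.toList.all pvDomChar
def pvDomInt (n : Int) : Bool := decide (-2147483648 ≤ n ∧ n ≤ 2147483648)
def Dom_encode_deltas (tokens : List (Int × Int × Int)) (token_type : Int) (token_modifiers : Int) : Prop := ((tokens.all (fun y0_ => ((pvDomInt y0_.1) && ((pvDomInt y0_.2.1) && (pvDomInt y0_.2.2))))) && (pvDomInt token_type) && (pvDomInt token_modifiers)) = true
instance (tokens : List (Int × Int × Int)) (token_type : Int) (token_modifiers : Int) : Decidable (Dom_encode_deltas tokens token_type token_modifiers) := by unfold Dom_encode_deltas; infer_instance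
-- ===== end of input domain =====

-- B builds the output columnar: it preallocates the 5n result and fills line-deltas (adjacent differences), starts, lengths, type and modifier columns separately, instead of A's row-wise stateful loop; same O(n) cost.


-- ===== PORT A =====
def encode_deltas (tokens : List (Int × Int × Int)) (token_type : Int) (token_modifiers : Int) : List Int :=
  -- literal port of A: loop with encoded / last_line / last_col (constant 0) state
  (tokens.foldl
    (fun (st : List Int × Option Int × Int) tok =>
      let line := tok.1
      let start := tok.2.1
      let length := tok.2.2
      let backup := line
      let start := if some line = st.2.1 then start - st.2.2 else start
      let line := match st.2.1 with
        | some last_line => line - last_line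
        | none => line
      (st.1 ++ [line, start, length, token_type, token_modifiers], some backup, st.2.2))
    ([], none, 0)).1

-- ===== PORT B =====
-- interleaving of the five columns = B's strided slice assignments res[k::5] read back row-wise
def interleave5 : List Int → List Int → List Int → List Int → List Int → List Int
  | a :: as, b :: bs, c :: cs, d :: ds, e :: es => a :: b :: c :: d :: e :: interleave5 as bs cs ds es
  | _, _, _, _, _ => []

def encode_deltas_alt (tokens : List (Int × Int × Int)) (token_type : Int) (token_modifiers : Int) : List Int :=
  -- port of B: build the five columns (deltas of lines, starts, lengths, constant columns) and interleave them
  let lines := tokens.map (fun t => t.1)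
  let deltas := lines.take 1 ++ (lines.zip lines.tail).map (fun p => p.2 - p.1)
  let starts := tokens.map (fun t => t.2.1)
  let lengths := tokens.map (fun t => t.2.2)
  let types := List.replicate tokens.length token_type
  let mods := List.replicate tokens.length token_modifiers
  interleave5 deltas starts lengths types mods

-- ===== PRECONDITION & SPEC =====
def Spec_encode_deltas (tokens : List (Int × Int × Int)) (token_type : Int) (token_modifiers : Int) (out : List Int) : Prop := out = encode_deltas_alt tokens token_type token_modifiers
instance (tokens : List (Int × Int × Int)) (token_type : Int) (token_modifiers : Int) (out : List Int) : Decidable (Spec_encode_deltas tokens token_type token_modifiers out) := by unfold Spec_encode_deltas; infer_instance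

-- ===== CLAIM (what is proved, stated in full; the proofs are below) =====
def Claim_equal_encode_deltas : Prop := ∀ (tokens : List (Int × Int × Int)) (token_type : Int) (token_modifiers : Int), Dom_encode_deltas tokens token_type token_modifiers → Spec_encode_deltas tokens token_type token_modifiers (encode_deltas tokens token_type token_modifiers)

-- ===== LEMMAS AND PROOFS =====
-- delta column carrying an optional previous line (captures both ports' first-token case)
def dAux : Option Int → List Int → List Int
  | _, [] => []
  | last, x :: xs => (match last with | none => x | some l => x - l) :: dAux (some x) xs

theorem dAux_some (xs : List Int) (l : Int) :
    dAux (some l) xs = ((l :: xs).zip xs).map (fun p => p.2 - p.1) := by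
  induction xs generalizing l with
  | nil => rfl
  | cons x xs ih => simp [dAux, ih]

theorem dAux_none (xs : List Int) :
    dAux none xs = xs.take 1 ++ (xs.zip xs.tail).map (fun p => p.2 - p.1) := by
  cases xs with
  | nil => rfl
  | cons x xs => simp [dAux, dAux_some]

theorem encode_deltas_loop (tokens : List (Int × Int × Int)) (token_type token_modifiers : Int)
    (acc : List Int) (last : Option Int) :
    (tokens.foldl
      (fun (st : List Int × Option Int × Int) tok =>
        let line := tok.1
        let start := tok.2.1
        let length := tok.2.2
        let backup := line
        let start := if some line = st.2.1 then start - st.2.2 else start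
        let line := match st.2.1 with
          | some last_line => line - last_line
          | none => line
        (st.1 ++ [line, start, length, token_type, token_modifiers], some backup, st.2.2))
      (acc, last, 0)).1
    = acc ++ interleave5 (dAux last (tokens.map (fun t => t.1)))
        (tokens.map (fun t => t.2.1)) (tokens.map (fun t => t.2.2))
        (List.replicate tokens.length token_type) (List.replicate tokens.length token_modifiers) := by
  induction tokens generalizing acc last with
  | nil => simp [interleave5]
  | cons t rest ih =>
    simp only [List.foldl_cons, List.map_cons, List.length_cons, List.replicate_succ, dAux,
      interleave5]
    rw [ih]
    cases last with
    | none => simp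
    | some l =>
      by_cases h : t.1 = l <;> simp [h]

-- ===== VERDICT (by name: the statement is the Claim_ definition above) =====
theorem encode_deltas_spec : Claim_equal_encode_deltas := by
  intro tokens token_type token_modifiers _
  unfold Spec_encode_deltas encode_deltas encode_deltas_alt
  rw [encode_deltas_loop tokens token_type token_modifiers [] none, dAux_none]
  simp
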